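-- pv_equiv track=rewrite | github.com/tkddls23/BaekJoon | jonghyun/인사고과(2023-02-21).py | answerCal
-- ===== SOURCE A (Python) =====
-- def answerCal(scores, myScore):
--     answer = 0
--     wA = myScore[0]
--     wB = myScore[1]
--     for score in scores :
--         A = score[0]
--         B = score[1]
--         if wA < A and wB < B :
--             return -1
--         if (wA + wB) < (A + B) :
--             answer += 1
--     return answer + 1
-- ===== SOURCE B (Python) =====
-- def answerCal(scores, myScore):
--     wA, wB = myScore
--     # running max of b over all entries strictly beating me on the first axis
--     best = None
--     for a, b in scores:
--         if wA < a and (best is None or best < b):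
--             best = b
--     if best is not None and wB < best:
--         return -1
--     # rank by total: sort sums descending, count the strictly-greater prefix
--     sums = sorted((a + b for a, b in scores), reverse=True)
--     rank = 0
--     while rank < len(sums) and wA + wB < sums[rank]:
--         rank += 1
--     return rank + 1
-- ===== Notes on version B (the rewrite author's own statement) =====
-- stated objective: alternative
-- what changed: Dominance is decided by a running-max reduction (max b over entries with a > wA, compared once against wB) instead of per-element conjunction tests, and the rank is computed by sorting the totals descending and counting the strictly-greater prefix instead of a direct filtered count.
import Mathlib
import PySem

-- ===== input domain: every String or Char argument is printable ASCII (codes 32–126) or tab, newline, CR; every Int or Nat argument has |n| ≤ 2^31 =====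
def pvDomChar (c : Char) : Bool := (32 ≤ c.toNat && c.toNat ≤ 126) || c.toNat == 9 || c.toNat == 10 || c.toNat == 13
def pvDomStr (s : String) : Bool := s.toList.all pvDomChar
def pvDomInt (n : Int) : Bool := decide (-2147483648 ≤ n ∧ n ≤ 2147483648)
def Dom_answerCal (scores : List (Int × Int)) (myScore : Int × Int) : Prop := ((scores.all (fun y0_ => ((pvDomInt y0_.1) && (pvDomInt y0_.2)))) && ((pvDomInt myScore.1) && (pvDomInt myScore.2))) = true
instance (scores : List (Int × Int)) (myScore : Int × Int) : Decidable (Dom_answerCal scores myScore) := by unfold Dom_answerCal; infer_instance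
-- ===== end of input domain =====

-- B replaces A's fused per-element loop by a running-max dominance reduction plus a sort-then-prefix-count rank; alternative algorithm, same result.

-- ===== PORT A =====
-- A's single fused loop: early -1 on strict dominance, else count larger sums, +1 at end.
def answerCalLoop (wA wB : Int) (answer : Int) : List (Int × Int) → Int
  | [] => answer + 1
  | score :: rest =>
    let A := score.1
    let B := score.2
    if wA < A ∧ wB < B then -1
    else if wA + wB < A + B then answerCalLoop wA wB (answer + 1) rest
    else answerCalLoop wA wB answer rest

def answerCal (scores : List (Int × Int)) (myScore : Int × Int) : Int :=
  answerCalLoop myScore.1 myScore.2 0 scores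

-- ===== PORT B =====
-- B pass 1: running max of b over entries with wA < a (None if no such entry).
-- `best is None or best < b` as a Bool
def answerCalLt (best : Option Int) (b : Int) : Bool :=
  match best with | none => true | some m => decide (m < b)

def answerCalStep (wA : Int) (best : Option Int) (p : Int × Int) : Option Int :=
  if decide (wA < p.1) && answerCalLt best p.2 then some p.2 else best

def answerCalBest (wA : Int) (scores : List (Int × Int)) : Option Int :=
  scores.foldl (answerCalStep wA) none

-- B pass 2: the while loop — count the strictly-greater prefix of the descending sums.
def answerCalRank (mysum : Int) : List Int → Int
  | [] => 0
  | s :: rest => if mysum < s then 1 + answerCalRank mysum rest else 0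

def answerCal_alt (scores : List (Int × Int)) (myScore : Int × Int) : Int :=
  let wA := myScore.1
  let wB := myScore.2
  match answerCalBest wA scores with
  | some best =>
    if wB < best then -1
    else
      answerCalRank (wA + wB)
        (PySem.List.sorted (scores.map (fun p => p.1 + p.2)) (fun x => x) true) + 1
  | none =>
      answerCalRank (wA + wB)
        (PySem.List.sorted (scores.map (fun p => p.1 + p.2)) (fun x => x) true) + 1

-- ===== PRECONDITION & SPEC =====
def Spec_answerCal (scores : List (Int × Int)) (myScore : Int × Int) (out : Int) : Prop := out = answerCal_alt scores myScore
instance (scores : List (Int × Int)) (myScore : Int × Int) (out : Int) : Decidable (Spec_answerCal scores myScore out) := by unfold Spec_answerCal; infer_instance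

-- ===== CLAIM =====
def Claim_equal_answerCal : Prop := ∀ (scores : List (Int × Int)) (myScore : Int × Int), Dom_answerCal scores myScore → Spec_answerCal scores myScore (answerCal scores myScore)

-- ===== LEMMAS AND PROOFS =====

-- A's loop equals: -1 if any remaining element dominates, else answer + (count of larger sums) + 1.
theorem answerCalLoop_eq (wA wB : Int) (answer : Int) (l : List (Int × Int)) :
    answerCalLoop wA wB answer l =
      if l.any (fun p => wA < p.1 && wB < p.2) then -1
      else answer + (l.countP (fun p => wA + wB < p.1 + p.2) : Int) + 1 := by
  induction l generalizing answer with
  | nil => simp [answerCalLoop]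
  | cons hd tl ih =>
    simp only [answerCalLoop, List.any_cons, List.countP_cons]
    by_cases h1 : wA < hd.1 ∧ wB < hd.2
    · simp [h1]
    · have hb : (decide (wA < hd.1) && decide (wB < hd.2)) = false := by
        rcases not_and_or.mp h1 with h | h <;> simp [h]
      rw [if_neg h1, hb]
      simp only [Bool.false_or]
      by_cases h2 : wA + wB < hd.1 + hd.2
      · rw [if_pos h2, ih, decide_eq_true h2]
        by_cases ht : (tl.any fun p => decide (wA < p.1) && decide (wB < p.2)) = true
        · simp [ht]
        · simp [ht]; ring
      · rw [if_neg h2, ih, decide_eq_false h2]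
        simp

-- the dominance predicate read off an Option best
def optDom (wB : Int) : Option Int → Prop
  | none => False
  | some m => wB < m

-- the running-max fold detects dominance exactly
theorem answerCalBest_dom (wA wB : Int) (l : List (Int × Int)) (best : Option Int) :
    optDom wB (l.foldl (answerCalStep wA) best)
      ↔ optDom wB best ∨ ∃ p ∈ l, wA < p.1 ∧ wB < p.2 := by
  induction l generalizing best with
  | nil => simp
  | cons hd tl ih =>
    simp only [List.foldl_cons, ih, List.mem_cons]
    constructor
    · rintro (h | h)
      · unfold answerCalStep at h
        split_ifs at h with hc
        · simp only [Bool.and_eq_true, decide_eq_true_eq] at hc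
          simp only [optDom] at h
          exact Or.inr ⟨hd, Or.inl rfl, hc.1, h⟩
        · exact Or.inl h
      · rcases h with ⟨p, hp, hcond⟩
        exact Or.inr ⟨p, Or.inr hp, hcond⟩
    · rintro (h | ⟨p, hp | hp, ha, hb⟩)
      · left
        unfold answerCalStep
        split_ifs with hc
        · simp only [Bool.and_eq_true, decide_eq_true_eq] at hc
          cases best with
          | none => exact absurd h (by simp [optDom])
          | some m =>
            simp only [answerCalLt, decide_eq_true_eq] at hc
            simp only [optDom] at h ⊢
            omega
        · exact h
      · subst hp
        left
        unfold answerCalStep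
        split_ifs with hc
        · simpa [optDom] using hb
        · simp only [Bool.and_eq_true, decide_eq_true_eq, not_and] at hc
          cases best with
          | none => simp [answerCalLt, ha] at hc
          | some m =>
            have := hc ha
            simp only [answerCalLt, decide_eq_true_eq] at this
            simp only [optDom] at *
            omega
      · exact Or.inr ⟨p, hp, ha, hb⟩

-- prefix count on a descending list equals the full strict count
theorem answerCalRank_eq_countP (m : Int) (l : List Int)
    (h : l.Pairwise (fun a b => b ≤ a)) :
    answerCalRank m l = (l.countP (fun s => m < s) : Int) := by
  induction l with
  | nil => simp [answerCalRank]
  | cons hd tl ih =>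
    rcases List.pairwise_cons.mp h with ⟨hhd, htl⟩
    simp only [answerCalRank, List.countP_cons]
    by_cases hm : m < hd
    · rw [if_pos hm, ih htl, decide_eq_true hm]
      simp only [if_true]
      push_cast; ring
    · rw [if_neg hm, decide_eq_false hm]
      have : tl.countP (fun s => decide (m < s)) = 0 := by
        rw [List.countP_eq_zero]
        intro s hs
        have := hhd s hs
        simp only [decide_eq_true_eq]
        omega
      simp [this]

theorem rank_sorted_eq (wA wB : Int) (scores : List (Int × Int)) :
    answerCalRank (wA + wB)
        (PySem.List.sorted (scores.map (fun p => p.1 + p.2)) (fun x => x) true)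
      = (scores.countP (fun p => wA + wB < p.1 + p.2) : Int) := by
  rw [answerCalRank_eq_countP _ _ (PySem.List.sorted_pairwise_rev _ _)]
  have hperm : (PySem.List.sorted (scores.map (fun p => p.1 + p.2)) (fun x => x) true).Perm
      (scores.map (fun p => p.1 + p.2)) := PySem.List.sorted_perm _ _ _
  rw [hperm.countP_eq, List.countP_map]
  rfl

-- ===== VERDICT =====
theorem answerCal_spec : Claim_equal_answerCal := by
  intro scores myScore _
  unfold Spec_answerCal answerCal answerCal_alt
  rw [answerCalLoop_eq]
  have hdom := answerCalBest_dom myScore.1 myScore.2 scores none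
  simp only [optDom, false_or] at hdom
  by_cases h : ∃ p ∈ scores, myScore.1 < p.1 ∧ myScore.2 < p.2
  · have hany : (scores.any fun p => decide (myScore.1 < p.1) && decide (myScore.2 < p.2)) = true := by
      rcases h with ⟨p, hp, h1, h2⟩
      exact List.any_eq_true.mpr ⟨p, hp, by simp [h1, h2]⟩
    rw [if_pos hany]
    have hopt : optDom myScore.2 (answerCalBest myScore.1 scores) := hdom.mpr h
    cases hb : answerCalBest myScore.1 scores with
    | none => rw [hb] at hopt; exact absurd hopt (by simp [optDom])
    | some m =>
      rw [hb] at hopt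
      simp only [optDom] at hopt
      simp only [hb, if_pos hopt]
  · have hany : (scores.any fun p => decide (myScore.1 < p.1) && decide (myScore.2 < p.2)) = false := by
      rw [Bool.eq_false_iff]
      intro hc
      rcases List.any_eq_true.mp hc with ⟨p, hp, hcond⟩
      simp only [Bool.and_eq_true, decide_eq_true_eq] at hcond
      exact h ⟨p, hp, hcond⟩
    rw [hany]
    have hopt : ¬ optDom myScore.2 (answerCalBest myScore.1 scores) := fun hc => h (hdom.mp hc)
    cases hb : answerCalBest myScore.1 scores with
    | none => simp [hb, rank_sorted_eq]
    | some m =>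
      rw [hb] at hopt
      simp only [optDom] at hopt
      simp [hb, hopt, rank_sorted_eq]
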